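-- pv_equiv track=rewrite | github.com/ArisSgouros/SimuGlue | src/simuglue/topology/typing.py | sort_improper
-- ===== SOURCE A (Python) =====
-- from itertools import permutations
--
-- def canonical_by_perms(chem_list, perms):
--     t = tuple(map(str, chem_list))
--     return list(min(tuple(t[i] for i in p) for p in perms))
--
-- def sort_improper(chem_list, center=1):
--     # center fixed; permute outers
--     idx = [0,1,2,3]
--     outers = [i for i in idx if i != center]
--     perms = []
--     for p in permutations(outers):
--         seq = []
--         it = iter(p)
--         for i in idx:
--             seq.append(center if i == center else next(it))
--         perms.append(tuple(seq))
--     return canonical_by_perms(chem_list, perms)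
-- ===== SOURCE B (Python) =====
-- def sort_improper(chem_list, center=1):
--     strs = [str(x) for x in chem_list]
--     outers = sorted(strs[i] for i in (0, 1, 2, 3) if i != center)
--     it = iter(outers)
--     return [strs[center] if i == center else next(it) for i in range(4)]
-- ===== Notes on version B (the rewrite author's own statement) =====
-- stated objective: simpler
-- what changed: A enumerates all permutations of the three outer atoms, builds a candidate tuple for each and takes the lexicographic minimum; B sorts the outer strings once and places them around the fixed center slot, with no permutation enumeration and no min.
import Mathlib
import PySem

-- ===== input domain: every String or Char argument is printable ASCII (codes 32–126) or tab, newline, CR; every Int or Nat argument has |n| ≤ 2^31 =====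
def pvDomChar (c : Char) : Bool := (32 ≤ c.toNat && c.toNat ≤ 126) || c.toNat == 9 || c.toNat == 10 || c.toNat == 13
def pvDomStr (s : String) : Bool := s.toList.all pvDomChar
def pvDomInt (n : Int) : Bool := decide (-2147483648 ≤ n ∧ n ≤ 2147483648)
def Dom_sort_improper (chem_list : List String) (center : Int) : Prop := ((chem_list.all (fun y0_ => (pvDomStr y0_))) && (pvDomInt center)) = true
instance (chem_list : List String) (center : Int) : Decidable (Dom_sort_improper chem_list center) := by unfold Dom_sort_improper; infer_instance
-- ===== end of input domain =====

-- B replaces A's enumerate-all-permutations-and-take-the-min by sorting the three outer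
-- strings once and placing them around the fixed center slot (objective: simpler).

-- ===== PORT A =====
-- Python tuple '<' on the (equal-length) candidate tuples of strings, transliterated.
def pvListLt : List String → List String → Bool
  | [], [] => false
  | [], _ :: _ => true
  | _ :: _, [] => false
  | x :: xs, y :: ys => decide (x < y) || (x == y && pvListLt xs ys)

-- canonical_by_perms: t = tuple(map(str,chem_list)) (str on str is the identity);
-- min(...) over the candidate tuples, first minimum kept (ties are equal lists).
-- t[i]: pyGetD, exact under Pre_ (indices are 0..3, Python raises IndexError otherwise).
def canonical_by_perms (chem_list : List String) (perms : List (List Int)) : List String :=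
  let t := chem_list.map (fun s => s)
  match perms.map (fun p => p.map (fun i => PySem.List.pyGetD t i "")) with
  | [] => []  -- unreachable: min() on an empty sequence would raise (perms is never empty)
  | c :: cs => cs.foldl (fun best cand => if pvListLt cand best then cand else best) c

-- the inner 'for i in idx: seq.append(center if i == center else next(it))' loop
def pvBuildSeq (center : Int) : List Int → List Int → List Int
  | [], _ => []
  | i :: is, p =>
    if i = center then center :: pvBuildSeq center is p
    else match p with
      | [] => []  -- next(it) would raise StopIteration; never reached
      | q :: qs => q :: pvBuildSeq center is qs

-- itertools.permutations(outers) ported as Mathlib's List.permutations (the enumeration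
-- order differs, but the min taken below gives the same value for any enumeration order).
def sort_improper (chem_list : List String) (center : Int) : List String :=
  let idx : List Int := [0, 1, 2, 3]
  let outers := idx.filter (fun i => i ≠ center)
  let perms := outers.permutations.map (fun p => pvBuildSeq center idx p)
  canonical_by_perms chem_list perms

-- ===== PORT B =====
-- the list comprehension '[strs[center] if i == center else next(it) for i in range(4)]'
def pvPlace (strs : List String) (center : Int) : List Int → List String → List String
  | [], _ => []
  | i :: is, rem =>
    if i = center then PySem.List.pyGetD strs center "" :: pvPlace strs center is rem
    else match rem with
      | [] => []  -- next(it) would raise StopIteration; never reached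
      | q :: qs => q :: pvPlace strs center is qs

def sort_improper_alt (chem_list : List String) (center : Int) : List String :=
  let strs := chem_list.map (fun s => s)
  let outers := PySem.List.sorted
    ((([0, 1, 2, 3] : List Int).filter (fun i => i ≠ center)).map
      (fun i => PySem.List.pyGetD strs i ""))
    (fun x => x) false
  pvPlace strs center (PySem.List.pyRange 0 4 1) outers

-- ===== PRECONDITION & SPEC =====
-- Pre_: both Pythons index positions 0..3, so they raise IndexError on lists shorter
-- than 4; exactly those inputs are excluded (no input on which A returns is excluded).
def Pre_sort_improper (chem_list : List String) (center : Int) : Prop :=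
  4 ≤ chem_list.length
instance (chem_list : List String) (center : Int) : Decidable (Pre_sort_improper chem_list center) := by unfold Pre_sort_improper; infer_instance

def pvWitness_sort_improper : List String × Int := (["C", "H", "O", "N"], 1)

def Spec_sort_improper (chem_list : List String) (center : Int) (out : List String) : Prop := out = sort_improper_alt chem_list center
instance (chem_list : List String) (center : Int) (out : List String) : Decidable (Spec_sort_improper chem_list center out) := by unfold Spec_sort_improper; infer_instance

-- ===== CLAIM (what is proved, stated in full; the proofs are below) =====
def Claim_equal_sort_improper : Prop := ∀ (chem_list : List String) (center : Int), Dom_sort_improper chem_list center → Pre_sort_improper chem_list center → Spec_sort_improper chem_list center (sort_improper chem_list center)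

-- ===== LEMMAS AND PROOFS =====

theorem pvListLt_irrefl (u : List String) : pvListLt u u = false := by
  induction u with
  | nil => simp [pvListLt]
  | cons x xs ih => simp [pvListLt, ih]

theorem pvListLt_trans {a b c : List String} (h1 : pvListLt a b = true)
    (h2 : pvListLt b c = true) : pvListLt a c = true := by
  induction a generalizing b c with
  | nil =>
    cases b with
    | nil => simp [pvListLt] at h1
    | cons y bs =>
      cases c with
      | nil => simp [pvListLt] at h2
      | cons z cs => simp [pvListLt]
  | cons x as ih =>
    cases b with
    | nil => simp [pvListLt] at h1
    | cons y bs =>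
      cases c with
      | nil => simp [pvListLt] at h2
      | cons z cs =>
        simp only [pvListLt, Bool.or_eq_true, Bool.and_eq_true, decide_eq_true_eq,
          beq_iff_eq] at h1 h2 ⊢
        rcases h1 with h1 | ⟨h1e, h1r⟩ <;> rcases h2 with h2 | ⟨h2e, h2r⟩
        · exact Or.inl (lt_trans h1 h2)
        · exact Or.inl (h2e ▸ h1)
        · exact Or.inl (h1e ▸ h2)
        · exact Or.inr ⟨h1e.trans h2e, ih h1r h2r⟩

theorem pvListLt_antisymm {u v : List String} (h1 : pvListLt u v = false)
    (h2 : pvListLt v u = false) : u = v := by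
  induction u generalizing v with
  | nil =>
    cases v with
    | nil => rfl
    | cons y vs => simp [pvListLt] at h1
  | cons x us ih =>
    cases v with
    | nil => simp [pvListLt] at h2
    | cons y vs =>
      simp only [pvListLt, Bool.or_eq_false_iff, Bool.and_eq_false_iff,
        decide_eq_false_iff_not, beq_eq_false_iff_ne, ne_eq] at h1 h2
      obtain ⟨hxy, h1'⟩ := h1
      obtain ⟨hyx, h2'⟩ := h2
      have hxe : x = y := le_antisymm (not_lt.mp hyx) (not_lt.mp hxy)
      subst hxe
      rcases h1' with h | h
      · exact absurd rfl h
      · rcases h2' with h' | h'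
        · exact absurd rfl h'
        · exact congrArg (x :: ·) (ih h h')

theorem foldl_min_mem (cs : List (List String)) (b : List String) :
    cs.foldl (fun best cand => if pvListLt cand best then cand else best) b ∈ b :: cs := by
  induction cs generalizing b with
  | nil => simp
  | cons c cs' ih =>
    simp only [List.foldl_cons]
    rcases List.mem_cons.mp (ih (if pvListLt c b then c else b)) with h | h
    · rw [h]
      by_cases hc : pvListLt c b = true <;> simp [hc]
    · simp [h]

theorem foldl_min_le (cs : List (List String)) (b : List String) :
    ∀ c ∈ b :: cs,
      pvListLt c (cs.foldl (fun best cand => if pvListLt cand best then cand else best) b)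
        = false := by
  induction cs generalizing b with
  | nil =>
    intro c hc
    simp at hc
    subst hc
    exact pvListLt_irrefl c
  | cons c0 cs' ih =>
    intro c hc
    simp only [List.foldl_cons]
    by_cases hc0 : pvListLt c0 b = true
    · rw [if_pos hc0]
      rcases List.mem_cons.mp hc with h | h
      · -- c = b
        subst h
        have hc0min := ih c0 c0 (by simp)
        by_cases hbr : pvListLt c
            (cs'.foldl (fun best cand => if pvListLt cand best then cand else best) c0) = true
        · exact absurd (pvListLt_trans hc0 hbr) (by simp [hc0min])
        · simpa using hbr
      · exact ih c0 c (by simpa using h)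
    · rw [if_neg hc0]
      rcases List.mem_cons.mp hc with h | h
      · exact ih b c (by simp [h])
      · rcases List.mem_cons.mp h with h' | h'
        · -- c = c0, accumulator stays b, and ¬ c0 < b
          subst h'
          have hc0' : pvListLt c b = false := by simpa using hc0
          have hbmin := ih b b (by simp)
          by_cases hcr : pvListLt c
              (cs'.foldl (fun best cand => if pvListLt cand best then cand else best) b) = true
          · by_cases hbc : pvListLt b c = true
            · exact absurd (pvListLt_trans hbc hcr) (by simp [hbmin])
            · have : b = c := pvListLt_antisymm (by simpa using hbc) hc0'
              subst this
              exact absurd hcr (by simp [hbmin])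
          · simpa using hcr
        · exact ih b c (by simp [h'])

theorem foldl_min_eq (cs : List (List String)) (b m : List String)
    (hmem : m ∈ b :: cs) (hmin : ∀ c ∈ b :: cs, pvListLt c m = false) :
    cs.foldl (fun best cand => if pvListLt cand best then cand else best) b = m := by
  have h1 := hmin _ (foldl_min_mem cs b)
  have h2 := foldl_min_le cs b m hmem
  exact pvListLt_antisymm h1 h2

-- a sorted (pairwise ≤) list is lexicographically minimal among its permutations
theorem lex_min_of_sorted {u v : List String} (hpair : u.Pairwise (· ≤ ·))
    (hperm : u.Perm v) : pvListLt v u = false := by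
  induction u generalizing v with
  | nil =>
    have := hperm.nil_eq
    simp [← this, pvListLt]
  | cons x us ih =>
    cases v with
    | nil => exact absurd hperm.length_eq (by simp)
    | cons y vs =>
      have hy : y ∈ x :: us := hperm.symm.subset (List.mem_cons_self ..)
      have hxy : x ≤ y := by
        rcases List.mem_cons.mp hy with h | h
        · exact le_of_eq h.symm
        · exact (List.pairwise_cons.mp hpair).1 y h
      simp only [pvListLt, Bool.or_eq_false_iff, Bool.and_eq_false_iff,
        decide_eq_false_iff_not, beq_eq_false_iff_ne, ne_eq]
      refine ⟨not_lt.mpr hxy, ?_⟩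
      by_cases hxe : y = x
      · subst hxe
        exact Or.inr (ih (List.pairwise_cons.mp hpair).2 (hperm.cons_inv.symm).symm)
      · exact Or.inl hxe

-- a permutation of a mapped list is realised by a permutation of the index list
theorem exists_map_perm {f : Int → String} :
    ∀ (l : List Int) (u : List String), u.Perm (l.map f) →
      ∃ p : List Int, p.Perm l ∧ p.map f = u := by
  intro l
  induction l with
  | nil =>
    intro u hu
    simp at hu
    exact ⟨[], by simp [hu]⟩
  | cons i l' ih =>
    intro u hu
    have hfi : f i ∈ u := hu.symm.subset (by simp)
    obtain ⟨u1, u2, rfl⟩ := List.append_of_mem hfi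
    have hmid : (u1 ++ f i :: u2).Perm (f i :: (u1 ++ u2)) := List.perm_middle
    have htail : (u1 ++ u2).Perm (l'.map f) := by
      have := (hmid.symm.trans hu)
      simpa using this.cons_inv
    obtain ⟨p', hp', hmap⟩ := ih (u1 ++ u2) htail
    obtain ⟨p1, p2, rfl, hm1, hm2⟩ := List.map_eq_append_iff.mp hmap
    refine ⟨p1 ++ i :: p2, ?_, by simp [hm1, hm2]⟩
    calc (p1 ++ i :: p2).Perm (i :: (p1 ++ p2)) := List.perm_middle
      _ = i :: (p1 ++ p2) := rfl
      _ |>.Perm (i :: l') := (hp'.cons i)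

-- master lemma: once the concrete center case fixes the outer index list o and the
-- common "insert the center string" shape ins, both ports compute ins (sorted outers)
theorem master (chem_list : List String) (center : Int) (o : List Int)
    (ins : List String → List String)
    (hfilter : ([0, 1, 2, 3] : List Int).filter (fun i => decide (i ≠ center)) = o)
    (hbuild : ∀ p : List Int, p.Perm o →
      (pvBuildSeq center [0, 1, 2, 3] p).map (fun i => PySem.List.pyGetD chem_list i "")
        = ins (p.map (fun i => PySem.List.pyGetD chem_list i "")))
    (hplace : ∀ u : List String,
      u.Perm (o.map (fun i => PySem.List.pyGetD chem_list i "")) →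
      pvPlace chem_list center (PySem.List.pyRange 0 4 1) u = ins u)
    (hlift : ∀ u v : List String,
      u.Perm (o.map (fun i => PySem.List.pyGetD chem_list i "")) →
      v.Perm (o.map (fun i => PySem.List.pyGetD chem_list i "")) →
      pvListLt (ins u) (ins v) = pvListLt u v) :
    sort_improper chem_list center = sort_improper_alt chem_list center := by
  have hid : chem_list.map (fun s => s) = chem_list := List.map_id' chem_list
  set f : Int → String := fun i => PySem.List.pyGetD chem_list i "" with hf
  -- the sorted outer strings
  set S : List String := PySem.List.sorted (o.map f) (fun x => x) false with hS
  have hSperm : S.Perm (o.map f) := PySem.List.sorted_perm ..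
  have hSpair : S.Pairwise (· ≤ ·) := by
    have := PySem.List.sorted_pairwise (o.map f) (fun x => x)
    simpa using this
  -- B computes ins S
  have hB : sort_improper_alt chem_list center = ins S := by
    unfold sort_improper_alt
    simp only [hid, hfilter]
    exact hplace S hSperm
  -- A computes the min of the candidates, which is ins S as well
  obtain ⟨q, hq, hqmap⟩ := exists_map_perm o S hSperm
  unfold sort_improper canonical_by_perms
  simp only [hid, hfilter, List.map_map]
  have hcands : (o.permutations.map
      ((fun p => p.map f) ∘ fun p => pvBuildSeq center [0, 1, 2, 3] p))
      = o.permutations.map (fun p => ins (p.map f)) := by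
    apply List.map_congr_left
    intro p hp
    exact hbuild p (List.mem_permutations.mp hp)
  rw [hcands]
  have hne : o ∈ o.permutations := List.mem_permutations.mpr (List.Perm.refl o)
  cases hperms : o.permutations.map (fun p => ins (p.map f)) with
  | nil =>
    rw [List.map_eq_nil_iff] at hperms
    simp [hperms] at hne
  | cons c cs =>
    rw [hB]
    apply foldl_min_eq
    · -- membership: ins S is one of the candidates
      rw [← hperms]
      have : ins S = ins (q.map f) := by rw [hqmap]
      rw [this]
      exact List.mem_map_of_mem (List.mem_permutations.mpr hq)
    · -- minimality
      intro cand hcand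
      rw [← hperms] at hcand
      obtain ⟨p, hp, rfl⟩ := List.mem_map.mp hcand
      have hpperm : (p.map f).Perm (o.map f) :=
        (List.mem_permutations.mp hp).map f
      rw [hlift (p.map f) S hpperm hSperm]
      exact lex_min_of_sorted hSpair (hSperm.trans hpperm.symm)

-- lengths of permutations of the concrete outer lists
theorem len3 {p : List Int} {a b c : Int} (h : p.Perm [a, b, c]) :
    ∃ x y z, p = [x, y, z] := by
  have : p.length = 3 := by simpa using h.length_eq
  exact List.length_eq_three.mp this

theorem len4 {p : List Int} {a b c d : Int} (h : p.Perm [a, b, c, d]) :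
    ∃ x y z w, p = [x, y, z, w] := by
  have hl : p.length = 4 := by simpa using h.length_eq
  cases p with
  | nil => simp at hl
  | cons x t =>
    have : t.length = 3 := by simpa using hl
    obtain ⟨y, z, w, rfl⟩ := List.length_eq_three.mp this
    exact ⟨x, y, z, w, rfl⟩

theorem len3' {u : List String} {a b c : String} (h : u.Perm [a, b, c]) :
    ∃ x y z, u = [x, y, z] := by
  have : u.length = 3 := by simpa using h.length_eq
  exact List.length_eq_three.mp this

theorem len4' {u : List String} {a b c d : String} (h : u.Perm [a, b, c, d]) :
    ∃ x y z w, u = [x, y, z, w] := by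
  have hl : u.length = 4 := by simpa using h.length_eq
  cases u with
  | nil => simp at hl
  | cons x t =>
    have : t.length = 3 := by simpa using hl
    obtain ⟨y, z, w, rfl⟩ := List.length_eq_three.mp this
    exact ⟨x, y, z, w, rfl⟩

theorem pyRange04 : PySem.List.pyRange 0 4 1 = [0, 1, 2, 3] := by decide

-- ===== VERDICT (by name: the statement is the Claim_ definition above) =====
theorem sort_improper_spec : Claim_equal_sort_improper := by
  intro chem_list center _ _
  unfold Spec_sort_improper
  set f : Int → String := fun i => PySem.List.pyGetD chem_list i "" with hf
  by_cases h0 : center = 0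
  · subst h0
    refine master chem_list 0 [1, 2, 3] (fun u => f 0 :: u) (by decide) ?_ ?_ ?_
    · intro p hp
      obtain ⟨x, y, z, rfl⟩ := len3 hp
      simp [pvBuildSeq, hf]
    · intro u hu
      obtain ⟨x, y, z, rfl⟩ := len3' hu
      simp [pvPlace, pyRange04, hf]
    · intro u v hu hv
      obtain ⟨x, y, z, rfl⟩ := len3' hu
      obtain ⟨x', y', z', rfl⟩ := len3' hv
      simp [pvListLt]
  · by_cases h1 : center = 1
    · subst h1
      refine master chem_list 1 [0, 2, 3]
        (fun u => match u with | x :: t => x :: f 1 :: t | [] => []) (by decide) ?_ ?_ ?_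
      · intro p hp
        obtain ⟨x, y, z, rfl⟩ := len3 hp
        simp [pvBuildSeq, hf]
      · intro u hu
        obtain ⟨x, y, z, rfl⟩ := len3' hu
        simp [pvPlace, pyRange04, hf]
      · intro u v hu hv
        obtain ⟨x, y, z, rfl⟩ := len3' hu
        obtain ⟨x', y', z', rfl⟩ := len3' hv
        simp [pvListLt]
    · by_cases h2 : center = 2
      · subst h2
        refine master chem_list 2 [0, 1, 3]
          (fun u => match u with | x :: y :: t => x :: y :: f 2 :: t | l => l)
          (by decide) ?_ ?_ ?_
        · intro p hp
          obtain ⟨x, y, z, rfl⟩ := len3 hp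
          simp [pvBuildSeq, hf]
        · intro u hu
          obtain ⟨x, y, z, rfl⟩ := len3' hu
          simp [pvPlace, pyRange04, hf]
        · intro u v hu hv
          obtain ⟨x, y, z, rfl⟩ := len3' hu
          obtain ⟨x', y', z', rfl⟩ := len3' hv
          simp [pvListLt]
      · by_cases h3 : center = 3
        · subst h3
          refine master chem_list 3 [0, 1, 2]
            (fun u => match u with | x :: y :: z :: t => x :: y :: z :: f 3 :: t | l => l)
            (by decide) ?_ ?_ ?_
          · intro p hp
            obtain ⟨x, y, z, rfl⟩ := len3 hp
            simp [pvBuildSeq, hf]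
          · intro u hu
            obtain ⟨x, y, z, rfl⟩ := len3' hu
            simp [pvPlace, pyRange04, hf]
          · intro u v hu hv
            obtain ⟨x, y, z, rfl⟩ := len3' hu
            obtain ⟨x', y', z', rfl⟩ := len3' hv
            simp [pvListLt]
        · -- center outside {0,1,2,3}: all four positions are outers
          refine master chem_list center [0, 1, 2, 3] (fun u => u) ?_ ?_ ?_ ?_
          · simp [List.filter, Ne.symm h0, Ne.symm h1, Ne.symm h2, Ne.symm h3]
          · intro p hp
            obtain ⟨x, y, z, w, rfl⟩ := len4 hp
            simp [pvBuildSeq, Ne.symm h0, Ne.symm h1, Ne.symm h2, Ne.symm h3]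
          · intro u hu
            obtain ⟨x, y, z, w, rfl⟩ := len4' hu
            simp [pvPlace, pyRange04, Ne.symm h0, Ne.symm h1, Ne.symm h2, Ne.symm h3]
          · intro u v _ _
            rfl
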